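-- pv_equiv track=rewrite | github.com/Ouranosinc/xclim | src/xclim/core/calendar.py | common_calendar
-- ===== SOURCE A (Python) =====
-- from collections.abc import Sequence
--
-- def common_calendar(calendars: Sequence[str], join="outer") -> str:
--     """
--     Return a calendar common to all calendars from a list.
--
--     Uses the hierarchy: 360_day < noleap < standard < all_leap.
--
--     Parameters
--     ----------
--     calendars : Sequence of str
--         List of calendar names.
--     join : {'inner', 'outer'}
--         The criterion for the common calendar.
--             - 'outer': the common calendar is the biggest calendar (in number of days by year) that will include all the
--                 dates of the other calendars.
--                 When converting the data to this calendar, no timeseries will lose elements, but some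
--                 might be missing (gaps or NaNs in the series).
--             - 'inner': the common calendar is the smallest calendar of the list.
--                 When converting the data to this calendar, no timeseries will have missing elements (no gaps or NaNs),
--                 but some might be dropped.
--
--     Returns
--     -------
--     str
--         Returns "default" only if all calendars are "default".
--
--     Examples
--     --------
--     >>> common_calendar(["360_day", "noleap", "default"], join="outer")
--     'standard'
--     >>> common_calendar(["360_day", "noleap", "default"], join="inner")
--     '360_day'
--     """
--     if all(cal == "default" for cal in calendars):
--         return "default"
--
--     trans = {
--         "proleptic_gregorian": "standard",
--         "gregorian": "standard",
--         "default": "standard",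
--         "366_day": "all_leap",
--         "365_day": "noleap",
--         "julian": "standard",
--     }
--     ranks = {"360_day": 0, "noleap": 1, "standard": 2, "all_leap": 3}
--     calendars = sorted([trans.get(cal, cal) for cal in calendars], key=ranks.get)
--
--     if join == "outer":
--         return calendars[-1]
--     if join == "inner":
--         return calendars[0]
--     raise NotImplementedError(f"Unknown join criterion `{join}`.")
-- ===== SOURCE B (Python) =====
-- def _translate(cal):
--     if cal == "proleptic_gregorian":
--         return "standard"
--     elif cal == "gregorian":
--         return "standard"
--     elif cal == "default":
--         return "standard"
--     elif cal == "366_day":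
--         return "all_leap"
--     elif cal == "365_day":
--         return "noleap"
--     elif cal == "julian":
--         return "standard"
--     return cal
--
--
-- def _rank(name):
--     if name == "360_day":
--         return 0
--     elif name == "noleap":
--         return 1
--     elif name == "standard":
--         return 2
--     elif name == "all_leap":
--         return 3
--     return None
--
--
-- def common_calendar(calendars, join="outer"):
--     if all(cal == "default" for cal in calendars):
--         return "default"
--     if join not in ("outer", "inner"):
--         raise NotImplementedError(f"Unknown join criterion `{join}`.")
--     outer = join == "outer"
--     best = None
--     best_rank = None
--     first = True
--     for cal in calendars:
--         name = _translate(cal)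
--         r = _rank(name)
--         if first:
--             best, best_rank, first = name, r, False
--         elif (best_rank < r) if outer else (r < best_rank):
--             best, best_rank = name, r
--     return best
-- ===== Notes on version B (the rewrite author's own statement) =====
-- stated objective: alternative
-- what changed: Replaces the trans/ranks dict lookups and the stable full sort followed by last/first indexing with if/elif translation and rank functions and one explicit loop keeping the running best-by-rank element (join validated up front).
import Mathlib
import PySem

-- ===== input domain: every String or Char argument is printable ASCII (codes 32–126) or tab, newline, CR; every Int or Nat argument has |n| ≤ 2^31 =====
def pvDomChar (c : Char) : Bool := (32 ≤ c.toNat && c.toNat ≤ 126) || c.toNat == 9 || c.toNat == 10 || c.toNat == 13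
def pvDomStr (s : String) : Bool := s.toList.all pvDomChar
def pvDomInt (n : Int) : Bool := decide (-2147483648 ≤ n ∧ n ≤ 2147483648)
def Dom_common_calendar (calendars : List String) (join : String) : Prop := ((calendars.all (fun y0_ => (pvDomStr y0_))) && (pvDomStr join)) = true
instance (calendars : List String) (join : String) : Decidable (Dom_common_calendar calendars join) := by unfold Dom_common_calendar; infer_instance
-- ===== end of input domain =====

-- B replaces the dict lookups and the full sort + last/first indexing by if/elif translation/rank
-- functions and one explicit loop keeping the running best element by rank (objective: alternative).

-- ===== PORT A =====
-- the two dict literals of A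
def pvTrans : PySem.Dict String String :=
  PySem.Dict.ofList [("proleptic_gregorian", "standard"), ("gregorian", "standard"),
    ("default", "standard"), ("366_day", "all_leap"), ("365_day", "noleap"), ("julian", "standard")]

def pvRanks : PySem.Dict String Int :=
  PySem.Dict.ofList [("360_day", 0), ("noleap", 1), ("standard", 2), ("all_leap", 3)]

-- ranks.get(c) is None for an unknown name and Python raises TypeError as soon as the sort
-- compares it; Pre_ excludes those inputs, so the port's key may be total (-1 there).
def pvRank (c : String) : Int := pvRanks.getD c (-1)

def common_calendar (calendars : List String) (join : String) : String :=
  if calendars.all (fun cal => cal == "default") then "default"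
  else
    let cals := PySem.List.sorted (calendars.map (fun cal => pvTrans.getD cal cal)) pvRank false
    if join == "outer" then (PySem.List.pyGet? cals (-1)).getD ""   -- cals ≠ [] inside Pre_
    else if join == "inner" then (PySem.List.pyGet? cals (0 : Int)).getD ""
    else ""   -- Python raises NotImplementedError here; outside Pre_

-- ===== PORT B =====
-- B's _translate: an if/elif chain
def altTrans (cal : String) : String :=
  if cal == "proleptic_gregorian" then "standard"
  else if cal == "gregorian" then "standard"
  else if cal == "default" then "standard"
  else if cal == "366_day" then "all_leap"
  else if cal == "365_day" then "noleap"
  else if cal == "julian" then "standard"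
  else cal

-- B's _rank: an if/elif chain returning None for unknown names
def altRank (name : String) : Option Int :=
  if name == "360_day" then some 0
  else if name == "noleap" then some 1
  else if name == "standard" then some 2
  else if name == "all_leap" then some 3
  else none

-- one iteration of B's loop; the accumulator is None before the first element, then (best, best_rank)
def altStep (outer : Bool) (acc : Option (String × Option Int)) (cal : String) :
    Option (String × Option Int) :=
  let name := altTrans cal
  let r := altRank name
  match acc with
  | none => some (name, r)
  | some (b, br) =>
    match br, r with
    | some bi, some ri =>
        if (if outer then bi < ri else ri < bi) then some (name, r) else some (b, br)
    | _, _ => some (b, br)   -- Python raises TypeError comparing None here; outside Pre_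

def common_calendar_alt (calendars : List String) (join : String) : String :=
  if calendars.all (fun cal => cal == "default") then "default"
  else if join == "outer" || join == "inner" then
    match calendars.foldl (altStep (join == "outer")) none with
    | some (b, _) => b
    | none => ""   -- unreachable: calendars ≠ [] when not all-default
  else ""   -- Python raises NotImplementedError here; outside Pre_

-- ===== PRECONDITION & SPEC =====
-- Pre_ excludes exactly the inputs on which A raises: an unknown join when not all calendars are
-- "default" (NotImplementedError), and an unknown calendar name in a list of length ≥ 2, where the
-- sort compares a None rank (TypeError).
def Pre_common_calendar (calendars : List String) (join : String) : Prop :=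
  (∀ c ∈ calendars, c = "default") ∨
    ((join = "outer" ∨ join = "inner") ∧ (calendars.length ≤ 1 ∨ ∀ c ∈ calendars,
      c ∈ (["proleptic_gregorian", "gregorian", "default", "366_day", "365_day", "julian",
            "360_day", "noleap", "standard", "all_leap"] : List String)))

instance (calendars : List String) (join : String) : Decidable (Pre_common_calendar calendars join) := by
  unfold Pre_common_calendar; infer_instance

def pvWitness_common_calendar : List String × String := (["360_day", "noleap", "default"], "outer")

def Spec_common_calendar (calendars : List String) (join : String) (out : String) : Prop := out = common_calendar_alt calendars join
instance (calendars : List String) (join : String) (out : String) : Decidable (Spec_common_calendar calendars join out) := by unfold Spec_common_calendar; infer_instance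

-- ===== CLAIM (what is proved, stated in full; the proofs are below) =====
def Claim_equal_common_calendar : Prop := ∀ (calendars : List String) (join : String), Dom_common_calendar calendars join → Pre_common_calendar calendars join → Spec_common_calendar calendars join (common_calendar calendars join)

-- ===== LEMMAS AND PROOFS =====

-- the four translated calendar names
def pvK4 : List String := ["360_day", "noleap", "standard", "all_leap"]

lemma pv_trans_known (c : String)
    (h : c ∈ (["proleptic_gregorian", "gregorian", "default", "366_day", "365_day", "julian",
               "360_day", "noleap", "standard", "all_leap"] : List String)) :
    pvTrans.getD c c ∈ pvK4 := by
  fin_cases h <;> decide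

lemma pv_rank_inj (a b : String) (ha : a ∈ pvK4) (hb : b ∈ pvK4)
    (h : pvRank a = pvRank b) : a = b := by
  fin_cases ha <;> fin_cases hb <;> first | rfl | (exfalso; revert h; decide)

-- B's _translate agrees with A's trans.get(cal, cal)
lemma pv_altTrans_eq (c : String) : altTrans c = pvTrans.getD c c := by
  unfold altTrans pvTrans
  by_cases h1 : c = "proleptic_gregorian"; · subst h1; decide
  by_cases h2 : c = "gregorian"; · subst h2; decide
  by_cases h3 : c = "default"; · subst h3; decide
  by_cases h4 : c = "366_day"; · subst h4; decide
  by_cases h5 : c = "365_day"; · subst h5; decide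
  by_cases h6 : c = "julian"; · subst h6; decide
  have e1 : ("proleptic_gregorian" == c) = false := by simp [Ne.symm h1]
  have e2 : ("gregorian" == c) = false := by simp [Ne.symm h2]
  have e3 : ("default" == c) = false := by simp [Ne.symm h3]
  have e4 : ("366_day" == c) = false := by simp [Ne.symm h4]
  have e5 : ("365_day" == c) = false := by simp [Ne.symm h5]
  have e6 : ("julian" == c) = false := by simp [Ne.symm h6]
  simp [PySem.Dict.getD, PySem.Dict.get?, PySem.Dict.ofList, PySem.Dict.update,
    PySem.Dict.insert, PySem.Dict.empty, List.find?,
    h1, h2, h3, h4, h5, h6, e1, e2, e3, e4, e5, e6]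

-- B's _rank agrees with A's ranks.get on the four known names
lemma pv_altRank_known (c : String) (h : c ∈ pvK4) : altRank c = some (pvRank c) := by
  fin_cases h <;> decide

-- the running-best fold of max?/min?, parametrised by the direction
def pvF (outer : Bool) (acc : Option String) (x : String) : Option String :=
  match acc with
  | none => some x
  | some m => if (if outer then pvRank m < pvRank x else pvRank x < pvRank m) then some x else some m

lemma pvF_true_eq_max (t : List String) :
    t.foldl (pvF true) none = PySem.List.max? t pvRank := by
  unfold PySem.List.max?
  congr 1
  funext acc x
  cases acc <;> simp [pvF]

lemma pvF_false_eq_min (t : List String) :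
    t.foldl (pvF false) none = PySem.List.min? t pvRank := by
  unfold PySem.List.min?
  congr 1
  funext acc x
  cases acc <;> simp [pvF]

-- B's loop, once started on a known name, is the pvF fold over the translated names,
-- carrying the rank of the running best alongside
lemma pv_fold_eq (outer : Bool) (cals : List String)
    (hK : ∀ c ∈ cals, altTrans c ∈ pvK4) (b : String) (hb : b ∈ pvK4) :
    cals.foldl (altStep outer) (some (b, some (pvRank b))) =
      ((cals.map altTrans).foldl (pvF outer) (some b)).map (fun m => (m, some (pvRank m))) := by
  induction cals generalizing b with
  | nil => rfl
  | cons c cs ih =>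
    have hc : altTrans c ∈ pvK4 := hK c (by simp)
    have hcs : ∀ x ∈ cs, altTrans x ∈ pvK4 := fun x hx => hK x (by simp [hx])
    have hstep : altStep outer (some (b, some (pvRank b))) c =
        some (if (if outer then pvRank b < pvRank (altTrans c) else pvRank (altTrans c) < pvRank b)
              then (altTrans c, some (pvRank (altTrans c))) else (b, some (pvRank b))) := by
      simp only [altStep, pv_altRank_known _ hc]
      split_ifs <;> rfl
    have hstep' : pvF outer (some b) (altTrans c) =
        some (if (if outer then pvRank b < pvRank (altTrans c) else pvRank (altTrans c) < pvRank b)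
              then altTrans c else b) := by
      simp only [pvF]; split_ifs <;> rfl
    rw [List.map_cons, List.foldl_cons, List.foldl_cons, hstep, hstep']
    by_cases h : (if outer = true then pvRank b < pvRank (altTrans c) else pvRank (altTrans c) < pvRank b)
    · rw [if_pos h, if_pos h]; exact ih hcs _ hc
    · rw [if_neg h, if_neg h]; exact ih hcs _ hb

-- last element of a stable sort equals the first max, when equal keys force equal elements
lemma pv_last_sorted_eq_max (t : List String) (key : String → Int) (ht : t ≠ [])
    (hinj : ∀ a ∈ t, ∀ b ∈ t, key a = key b → a = b) :
    (PySem.List.pyGet? (PySem.List.sorted t key false) (-1)).getD "" =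
      (PySem.List.max? t key).getD "" := by
  set s := PySem.List.sorted t key false with hs
  have hsne : s ≠ [] := by
    rw [hs]; simpa [PySem.List.sorted_eq_nil_iff] using ht
  have hlen : 0 < s.length := List.length_pos_iff.mpr hsne
  have h1 : 1 ≤ s.length := hlen
  have hget : PySem.List.pyGet? s (-1) = some s[s.length - 1] := by
    simp [PySem.List.pyGet?, PySem.List.pyIdx?, h1]
  obtain ⟨m2, hm2⟩ : ∃ m2, PySem.List.max? t key = some m2 := by
    cases h : PySem.List.max? t key with
    | none => exact absurd ((PySem.List.max?_eq_none_iff t key).mp h) ht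
    | some m => exact ⟨m, rfl⟩
  have hm2mem : m2 ∈ t := PySem.List.max?_mem hm2
  have hm2max : ∀ y ∈ t, key y ≤ key m2 := PySem.List.max?_isMax hm2
  have hperm : s.Perm t := by rw [hs]; exact PySem.List.sorted_perm t key false
  have hm1mem : s[s.length - 1] ∈ t := hperm.mem_iff.mp (List.getElem_mem _)
  have hm1max : ∀ y ∈ t, key y ≤ key s[s.length - 1] := by
    intro y hy
    obtain ⟨p, hp, hpy⟩ := List.getElem_of_mem (hperm.mem_iff.mpr hy)
    subst hpy
    exact PySem.List.key_sorted_getElem_mono t key (p := p) (q := s.length - 1) (by omega) (by rw [← hs]; omega)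
  have : s[s.length - 1] = m2 :=
    hinj _ hm1mem _ hm2mem (le_antisymm (hm2max _ hm1mem) (hm1max _ hm2mem))
  rw [hget, hm2, this]

-- head of a stable sort equals the first min, under the same key-injectivity
lemma pv_head_sorted_eq_min (t : List String) (key : String → Int) (ht : t ≠ [])
    (hinj : ∀ a ∈ t, ∀ b ∈ t, key a = key b → a = b) :
    (PySem.List.pyGet? (PySem.List.sorted t key false) (0 : Int)).getD "" =
      (PySem.List.min? t key).getD "" := by
  set s := PySem.List.sorted t key false with hs
  have hsne : s ≠ [] := by
    rw [hs]; simpa [PySem.List.sorted_eq_nil_iff] using ht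
  obtain ⟨m, tl, hcons⟩ := List.exists_cons_of_ne_nil hsne
  have hget : PySem.List.pyGet? s (0 : Int) = some m := by
    rw [hcons]; simp [PySem.List.pyGet?, PySem.List.pyIdx?]
  obtain ⟨m2, hm2⟩ : ∃ m2, PySem.List.min? t key = some m2 := by
    cases h : PySem.List.min? t key with
    | none => exact absurd ((PySem.List.min?_eq_none_iff t key).mp h) ht
    | some m' => exact ⟨m', rfl⟩
  have hm2mem : m2 ∈ t := PySem.List.min?_mem hm2
  have hm2min : ∀ y ∈ t, key m2 ≤ key y := PySem.List.min?_isMin hm2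
  have hperm : s.Perm t := by rw [hs]; exact PySem.List.sorted_perm t key false
  have hmmem : m ∈ t := hperm.mem_iff.mp (by rw [hcons]; exact List.mem_cons_self)
  have hmmin : ∀ y ∈ t, key m ≤ key y :=
    PySem.List.key_head_sorted_le t key (hs.symm.trans hcons)
  have : m = m2 := hinj _ hmmem _ hm2mem (le_antisymm (hmmin _ hm2mem) (hm2min _ hmmem))
  rw [hget, hm2, this]

-- ===== VERDICT (by name: the statement is the Claim_ definition above) =====
theorem common_calendar_spec : Claim_equal_common_calendar := by
  intro calendars join _ hpre
  unfold Spec_common_calendar common_calendar common_calendar_alt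
  by_cases hall : calendars.all (fun cal => cal == "default") = true
  · simp [hall]
  · simp only [hall, Bool.false_eq_true, if_false]
    have hnotdef : ¬ ∀ c ∈ calendars, c = "default" := by
      intro h; exact hall (by simpa [List.all_eq_true] using h)
    obtain ⟨hjoin, hcal⟩ := hpre.resolve_left hnotdef
    have hne : calendars ≠ [] := by rintro rfl; exact hnotdef (by simp)
    have hjoinok : (join == "outer" || join == "inner") = true := by
      rcases hjoin with hj | hj <;> simp [hj]
    obtain ⟨c0, rest, hsplit⟩ := List.exists_cons_of_ne_nil hne
    -- case split: singleton list (any names) vs. all names known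
    rcases hcal with hlen | hknown
    · -- singleton: the sort does not compare and the loop runs once
      obtain ⟨c, rfl⟩ : ∃ c, calendars = [c] := by
        rw [hsplit] at hlen ⊢
        cases rest with
        | nil => exact ⟨c0, rfl⟩
        | cons _ _ => simp at hlen
      have hsort : PySem.List.sorted [pvTrans.getD c c] pvRank false = [pvTrans.getD c c] :=
        PySem.List.sorted_eq_self_of_pairwise _ pvRank (by simp)
      simp only [List.map_cons, List.map_nil, hsort, List.foldl_cons, List.foldl_nil, hjoinok,
        if_true, altStep, pv_altTrans_eq]
      rcases hjoin with hj | hj <;> subst hj <;>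
        simp [PySem.List.pyGet?, PySem.List.pyIdx?]
    · -- all names known: both sides compute the first extremal element by rank
      set t := calendars.map (fun cal => pvTrans.getD cal cal) with htdef
      have htmap : t = calendars.map altTrans := by
        simp [htdef, pv_altTrans_eq]
      have htne : t ≠ [] := by simpa [htdef] using hne
      have hK : ∀ x ∈ calendars, altTrans x ∈ pvK4 := by
        intro x hx; rw [pv_altTrans_eq]; exact pv_trans_known _ (hknown _ hx)
      have hinj : ∀ a ∈ t, ∀ b ∈ t, pvRank a = pvRank b → a = b := by
        intro a ha b hb hk
        rw [htmap] at ha hb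
        obtain ⟨ca, hca, rfl⟩ := List.mem_map.mp ha
        obtain ⟨cb, hcb, rfl⟩ := List.mem_map.mp hb
        exact pv_rank_inj _ _ (hK _ hca) (hK _ hcb) hk
      -- B's fold over the nonempty list
      have hc0K : altTrans c0 ∈ pvK4 := hK c0 (by rw [hsplit]; simp)
      have hrestK : ∀ x ∈ rest, altTrans x ∈ pvK4 := by
        intro x hx; exact hK x (by rw [hsplit]; simp [hx])
      have hfold : ∀ outer : Bool, calendars.foldl (altStep outer) none =
          ((calendars.map altTrans).foldl (pvF outer) none).map (fun m => (m, some (pvRank m))) := by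
        intro outer
        rw [hsplit, List.map_cons, List.foldl_cons, List.foldl_cons]
        have h0 : altStep outer none c0 = some (altTrans c0, some (pvRank (altTrans c0))) := by
          simp only [altStep, pv_altRank_known _ hc0K]
        have h0' : pvF outer none (altTrans c0) = some (altTrans c0) := rfl
        rw [h0, h0', pv_fold_eq outer rest hrestK _ hc0K]
      rcases hjoin with hj | hj <;> subst hj
      · simp only [show (("outer" == "outer") = true) from rfl, if_true, Bool.true_or, hfold true,
          ← htmap, pvF_true_eq_max t]
        rw [pv_last_sorted_eq_max t pvRank htne hinj]
        cases PySem.List.max? t pvRank <;> rfl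
      · simp only [show (("inner" == "outer") = false) from rfl, Bool.false_eq_true, if_false,
          show (("inner" == "inner") = true) from rfl, if_true, Bool.false_or, hfold false,
          ← htmap, pvF_false_eq_min t]
        rw [pv_head_sorted_eq_min t pvRank htne hinj]
        cases PySem.List.min? t pvRank <;> rfl
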